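-- pv_equiv track=rewrite | github.com/AlanJui/ho-lok-ue-tools | han_ji_dict/peh_oe_ji.py | get_primary_vowel
-- ===== SOURCE A (Python) =====
-- def get_primary_vowel(syllable):
--     """Get primary vowel based on the rules."""
--     vowels = [
--         'o',
--         'e',
--         'a',
--         'u',
--         'i',
--         'n',
--         'm',
--     ]
--     primary_vowel = None
--     for vowel in vowels:
--         if vowel in syllable:
--             if primary_vowel is None or vowels.index(vowel) < vowels.index(
--                 primary_vowel
--             ):
--                 primary_vowel = vowel
--     return primary_vowel
-- ===== SOURCE B (Python) =====
-- def get_primary_vowel(syllable):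
--     """Get primary vowel based on the rules."""
--     priority = {'o': 0, 'e': 1, 'a': 2, 'u': 3, 'i': 4, 'n': 5, 'm': 6}
--     best = None
--     best_rank = 7
--     for ch in syllable:
--         r = priority.get(ch, 7)
--         if r < best_rank:
--             best = ch
--             best_rank = r
--     return best
-- ===== Notes on version B (the rewrite author's own statement) =====
-- stated objective: alternative
-- what changed: B scans the syllable's characters once with a rank dictionary and keeps the best-ranked vowel seen, instead of A's loop over the fixed vowel list with substring tests and repeated list.index calls.
import Mathlib
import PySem

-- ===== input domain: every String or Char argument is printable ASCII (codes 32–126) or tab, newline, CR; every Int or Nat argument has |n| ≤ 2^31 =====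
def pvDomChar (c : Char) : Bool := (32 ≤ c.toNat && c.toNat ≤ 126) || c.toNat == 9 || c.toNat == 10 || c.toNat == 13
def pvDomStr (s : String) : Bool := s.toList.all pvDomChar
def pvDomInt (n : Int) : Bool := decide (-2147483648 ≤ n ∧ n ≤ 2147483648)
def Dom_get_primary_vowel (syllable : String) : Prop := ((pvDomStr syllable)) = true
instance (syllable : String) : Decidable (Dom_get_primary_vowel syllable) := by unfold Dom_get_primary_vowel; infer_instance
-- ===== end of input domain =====

-- B replaces A's loop over the fixed vowel list (per-vowel substring tests plus repeated
-- list.index calls) by a single scan of the syllable's characters keeping the best-ranked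
-- vowel seen via a rank dictionary (objective: alternative).

-- ===== PORT A =====
def pvVowelsA : List String := ["o", "e", "a", "u", "i", "n", "m"]

def get_primary_vowel (syllable : String) : Option String :=
  pvVowelsA.foldl (fun pv vowel =>
    if PySem.Str.isIn vowel syllable then
      match pv with
      | none => some vowel
      | some p =>
        -- vowels.index(vowel) < vowels.index(primary_vowel): both arguments are always
        -- members of the list, so Python's list.index never raises; ported as index? + getD 0
        if (PySem.List.index? pvVowelsA vowel).getD 0 < (PySem.List.index? pvVowelsA p).getD 0
        then some vowel else pv
    else pv) none

-- ===== PORT B =====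
def pvPriority : PySem.Dict String Int :=
  PySem.Dict.ofList [("o", 0), ("e", 1), ("a", 2), ("u", 3), ("i", 4), ("n", 5), ("m", 6)]

def get_primary_vowel_alt (syllable : String) : Option String :=
  (syllable.toList.foldl (fun (st : Option String × Int) ch =>
      let r := pvPriority.getD ch.toString 7
      if r < st.2 then (some ch.toString, r) else st)
    (none, 7)).1

-- ===== PRECONDITION & SPEC =====
def Spec_get_primary_vowel (syllable : String) (out : Option String) : Prop := out = get_primary_vowel_alt syllable
instance (syllable : String) (out : Option String) : Decidable (Spec_get_primary_vowel syllable out) := by unfold Spec_get_primary_vowel; infer_instance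

-- ===== CLAIM (what is proved, stated in full; the proofs are below) =====
def Claim_equal_get_primary_vowel : Prop := ∀ (syllable : String), Dom_get_primary_vowel syllable → Spec_get_primary_vowel syllable (get_primary_vowel syllable)

-- ===== LEMMAS AND PROOFS =====

-- rank of one character (B's dictionary lookup; 7 = not a vowel)
def pvRank (c : Char) : Int := pvPriority.getD c.toString 7

-- the vowel string a rank stands for (7 = none)
def pvVowelOf (r : Int) : Option String :=
  if r = 0 then some "o" else if r = 1 then some "e" else if r = 2 then some "a"
  else if r = 3 then some "u" else if r = 4 then some "i" else if r = 5 then some "n"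
  else if r = 6 then some "m" else none

-- rank of the best vowel occurring in the character list (7 = no vowel occurs)
def pvChainRank (s : List Char) : Int :=
  if s.contains 'o' then 0 else if s.contains 'e' then 1 else if s.contains 'a' then 2
  else if s.contains 'u' then 3 else if s.contains 'i' then 4 else if s.contains 'n' then 5
  else if s.contains 'm' then 6 else 7

-- B's running minimum of ranks
def pvMinr (r : Int) (s : List Char) : Int :=
  s.foldl (fun acc c => if pvRank c < acc then pvRank c else acc) r

lemma pvRank_eq (c : Char) :
    pvRank c = if c = 'o' then 0 else if c = 'e' then 1 else if c = 'a' then 2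
      else if c = 'u' then 3 else if c = 'i' then 4 else if c = 'n' then 5
      else if c = 'm' then 6 else 7 := by
  have ht : ∀ d : Char, (d.toString = c.toString) ↔ c = d := by
    intro d
    constructor
    · intro h; have := congrArg String.toList h
      simp [Char.toString] at this; exact this.symm
    · intro h; rw [h]
  have hmk : pvPriority = PySem.Dict.mk [("o", 0), ("e", 1), ("a", 2), ("u", 3), ("i", 4), ("n", 5), ("m", 6)] := by rfl
  have hs : ∀ d : Char, (d.toString = c.toString) = (c = d) := fun d => propext (ht d)
  rw [pvRank, hmk, PySem.Dict.getD_eq_get?_getD]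
  simp only [PySem.Dict.get?_mk_cons, beq_iff_eq]
  simp only [show ("o" : String) = Char.toString 'o' from rfl, show ("e" : String) = Char.toString 'e' from rfl,
    show ("a" : String) = Char.toString 'a' from rfl, show ("u" : String) = Char.toString 'u' from rfl,
    show ("i" : String) = Char.toString 'i' from rfl, show ("n" : String) = Char.toString 'n' from rfl,
    show ("m" : String) = Char.toString 'm' from rfl, hs]
  split_ifs <;> simp_all [PySem.Dict.get?]

lemma pvRank_bounds (c : Char) : 0 ≤ pvRank c ∧ pvRank c ≤ 7 := by
  rw [pvRank_eq]; split_ifs <;> omega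

lemma pvChainRank_bounds (s : List Char) : 0 ≤ pvChainRank s ∧ pvChainRank s ≤ 7 := by
  unfold pvChainRank; split_ifs <;> omega

lemma pvVowelOf_rank (c : Char) (h : pvRank c < 7) : pvVowelOf (pvRank c) = some c.toString := by
  rw [pvRank_eq] at *
  split_ifs at * <;> first | (subst_vars; rfl) | omega

lemma pvChainRank_cons (c : Char) (s : List Char) :
    pvChainRank (c :: s) = min (pvRank c) (pvChainRank s) := by
  have hb := pvChainRank_bounds s
  rw [pvRank_eq]
  by_cases h0 : c = 'o'
  · subst h0; simp [pvChainRank]; omega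
  by_cases h1 : c = 'e'
  · subst h1; simp [pvChainRank]; split_ifs <;> omega
  by_cases h2 : c = 'a'
  · subst h2; simp [pvChainRank]; split_ifs <;> omega
  by_cases h3 : c = 'u'
  · subst h3; simp [pvChainRank]; split_ifs <;> omega
  by_cases h4 : c = 'i'
  · subst h4; simp [pvChainRank]; split_ifs <;> omega
  by_cases h5 : c = 'n'
  · subst h5; simp [pvChainRank]; split_ifs <;> omega
  by_cases h6 : c = 'm'
  · subst h6; simp [pvChainRank]; split_ifs <;> omega
  · have e0 : ('o' == c) = false := by simp [beq_eq_false_iff_ne]; exact fun h => h0 h.symm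
    have e1 : ('e' == c) = false := by simp [beq_eq_false_iff_ne]; exact fun h => h1 h.symm
    have e2 : ('a' == c) = false := by simp [beq_eq_false_iff_ne]; exact fun h => h2 h.symm
    have e3 : ('u' == c) = false := by simp [beq_eq_false_iff_ne]; exact fun h => h3 h.symm
    have e4 : ('i' == c) = false := by simp [beq_eq_false_iff_ne]; exact fun h => h4 h.symm
    have e5 : ('n' == c) = false := by simp [beq_eq_false_iff_ne]; exact fun h => h5 h.symm
    have e6 : ('m' == c) = false := by simp [beq_eq_false_iff_ne]; exact fun h => h6 h.symm
    simp only [pvChainRank, List.contains_cons, e0, e1, e2, e3, e4, e5, e6, Bool.false_or,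
      if_neg h0, if_neg h1, if_neg h2, if_neg h3, if_neg h4, if_neg h5, if_neg h6]
    split_ifs <;> omega

lemma pvMinr_eq (s : List Char) : ∀ r : Int, r ≤ 7 → pvMinr r s = min r (pvChainRank s) := by
  induction s with
  | nil => intro r h; simp [pvMinr, pvChainRank]; omega
  | cons c t ih =>
    intro r h
    have hc := pvRank_bounds c
    have hstep : pvMinr r (c :: t) = pvMinr (if pvRank c < r then pvRank c else r) t := rfl
    rw [hstep, ih _ (by split_ifs <;> omega), pvChainRank_cons]
    have := pvChainRank_bounds t
    split_ifs <;> omega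

lemma foldB_eq (s : List Char) : ∀ r : Int, r ≤ 7 →
    (s.foldl (fun (st : Option String × Int) ch =>
        let rr := pvPriority.getD ch.toString 7
        if rr < st.2 then (some ch.toString, rr) else st)
      (pvVowelOf r, r)).1 = pvVowelOf (pvMinr r s) := by
  induction s with
  | nil => intro r _; rfl
  | cons c t ih =>
    intro r h
    have hc := pvRank_bounds c
    show (t.foldl _ (if pvRank c < r then (some c.toString, pvRank c) else (pvVowelOf r, r))).1
        = pvVowelOf (pvMinr (if pvRank c < r then pvRank c else r) t)
    by_cases hlt : pvRank c < r
    · rw [if_pos hlt, if_pos hlt, ← pvVowelOf_rank c (by omega)]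
      exact ih _ (by omega)
    · rw [if_neg hlt, if_neg hlt]; exact ih _ h

lemma B_eq (syllable : String) :
    get_primary_vowel_alt syllable = pvVowelOf (pvChainRank syllable.toList) := by
  unfold get_primary_vowel_alt
  rw [show ((none : Option String), (7 : Int)) = (pvVowelOf 7, 7) from rfl,
    foldB_eq _ 7 le_rfl, pvMinr_eq _ 7 le_rfl]
  have := pvChainRank_bounds syllable.toList
  congr 1; omega

lemma isIn_single (sub : String) (c : Char) (h : sub.toList = [c]) (s : String) :
    PySem.Str.isIn sub s = s.toList.contains c := by
  rw [Bool.eq_iff_iff, PySem.Str.isIn_iff_infix, h, List.singleton_infix_iff]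
  simp

set_option maxHeartbeats 2000000 in
lemma A_eq (syllable : String) :
    get_primary_vowel syllable = pvVowelOf (pvChainRank syllable.toList) := by
  rw [get_primary_vowel, pvVowelsA, List.foldl_cons, List.foldl_cons, List.foldl_cons,
    List.foldl_cons, List.foldl_cons, List.foldl_cons, List.foldl_cons, List.foldl_nil,
    isIn_single "o" 'o' rfl, isIn_single "e" 'e' rfl, isIn_single "a" 'a' rfl,
    isIn_single "u" 'u' rfl, isIn_single "i" 'i' rfl, isIn_single "n" 'n' rfl,
    isIn_single "m" 'm' rfl, pvChainRank, pvVowelOf]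
  by_cases h0 : 'o' ∈ syllable.toList
  · simp [h0, show ¬ ((List.idxOf? "e" ["o","e","a","u","i","n","m"]).getD 0 < (List.idxOf? "o" ["o","e","a","u","i","n","m"]).getD 0) by decide,
      show ¬ ((List.idxOf? "a" ["o","e","a","u","i","n","m"]).getD 0 < (List.idxOf? "o" ["o","e","a","u","i","n","m"]).getD 0) by decide,
      show ¬ ((List.idxOf? "u" ["o","e","a","u","i","n","m"]).getD 0 < (List.idxOf? "o" ["o","e","a","u","i","n","m"]).getD 0) by decide,
      show ¬ ((List.idxOf? "i" ["o","e","a","u","i","n","m"]).getD 0 < (List.idxOf? "o" ["o","e","a","u","i","n","m"]).getD 0) by decide,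
      show ¬ ((List.idxOf? "n" ["o","e","a","u","i","n","m"]).getD 0 < (List.idxOf? "o" ["o","e","a","u","i","n","m"]).getD 0) by decide,
      show ¬ ((List.idxOf? "m" ["o","e","a","u","i","n","m"]).getD 0 < (List.idxOf? "o" ["o","e","a","u","i","n","m"]).getD 0) by decide]
  by_cases h1 : 'e' ∈ syllable.toList
  · simp [h0, h1,
      show ¬ ((List.idxOf? "a" ["o","e","a","u","i","n","m"]).getD 0 < (List.idxOf? "e" ["o","e","a","u","i","n","m"]).getD 0) by decide,
      show ¬ ((List.idxOf? "u" ["o","e","a","u","i","n","m"]).getD 0 < (List.idxOf? "e" ["o","e","a","u","i","n","m"]).getD 0) by decide,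
      show ¬ ((List.idxOf? "i" ["o","e","a","u","i","n","m"]).getD 0 < (List.idxOf? "e" ["o","e","a","u","i","n","m"]).getD 0) by decide,
      show ¬ ((List.idxOf? "n" ["o","e","a","u","i","n","m"]).getD 0 < (List.idxOf? "e" ["o","e","a","u","i","n","m"]).getD 0) by decide,
      show ¬ ((List.idxOf? "m" ["o","e","a","u","i","n","m"]).getD 0 < (List.idxOf? "e" ["o","e","a","u","i","n","m"]).getD 0) by decide]
  by_cases h2 : 'a' ∈ syllable.toList
  · simp [h0, h1, h2,
      show ¬ ((List.idxOf? "u" ["o","e","a","u","i","n","m"]).getD 0 < (List.idxOf? "a" ["o","e","a","u","i","n","m"]).getD 0) by decide,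
      show ¬ ((List.idxOf? "i" ["o","e","a","u","i","n","m"]).getD 0 < (List.idxOf? "a" ["o","e","a","u","i","n","m"]).getD 0) by decide,
      show ¬ ((List.idxOf? "n" ["o","e","a","u","i","n","m"]).getD 0 < (List.idxOf? "a" ["o","e","a","u","i","n","m"]).getD 0) by decide,
      show ¬ ((List.idxOf? "m" ["o","e","a","u","i","n","m"]).getD 0 < (List.idxOf? "a" ["o","e","a","u","i","n","m"]).getD 0) by decide]
  by_cases h3 : 'u' ∈ syllable.toList
  · simp [h0, h1, h2, h3,
      show ¬ ((List.idxOf? "i" ["o","e","a","u","i","n","m"]).getD 0 < (List.idxOf? "u" ["o","e","a","u","i","n","m"]).getD 0) by decide,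
      show ¬ ((List.idxOf? "n" ["o","e","a","u","i","n","m"]).getD 0 < (List.idxOf? "u" ["o","e","a","u","i","n","m"]).getD 0) by decide,
      show ¬ ((List.idxOf? "m" ["o","e","a","u","i","n","m"]).getD 0 < (List.idxOf? "u" ["o","e","a","u","i","n","m"]).getD 0) by decide]
  by_cases h4 : 'i' ∈ syllable.toList
  · simp [h0, h1, h2, h3, h4,
      show ¬ ((List.idxOf? "n" ["o","e","a","u","i","n","m"]).getD 0 < (List.idxOf? "i" ["o","e","a","u","i","n","m"]).getD 0) by decide,
      show ¬ ((List.idxOf? "m" ["o","e","a","u","i","n","m"]).getD 0 < (List.idxOf? "i" ["o","e","a","u","i","n","m"]).getD 0) by decide]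
  by_cases h5 : 'n' ∈ syllable.toList
  · simp [h0, h1, h2, h3, h4, h5,
      show ¬ ((List.idxOf? "m" ["o","e","a","u","i","n","m"]).getD 0 < (List.idxOf? "n" ["o","e","a","u","i","n","m"]).getD 0) by decide]
  by_cases h6 : 'm' ∈ syllable.toList
  · simp [h0, h1, h2, h3, h4, h5, h6]
  · simp [h0, h1, h2, h3, h4, h5, h6]

-- ===== VERDICT (by name: the statement is the Claim_ definition above) =====
theorem get_primary_vowel_spec : Claim_equal_get_primary_vowel := by
  intro syllable _
  unfold Spec_get_primary_vowel
  rw [A_eq, B_eq]
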